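-- pv_equiv track=rewrite | github.com/po4yka/obsidian-to-anki | src/obsidian_anki_sync/agents/langchain/react_repair.py | _extract_analysis_summary
-- ===== SOURCE A (Python) =====
-- def _extract_analysis_summary(output: str) -> str:
--     """Extract analysis summary.
--
--     Args:
--         output: Agent output
--
--     Returns:
--         Analysis summary
--     """
--     lines = output.split("\n")
--     for line in lines:
--         if any(
--             word in line.lower() for word in ["analysis:", "summary:", "overview:"]
--         ):
--             return line.strip()
--
--     # First substantial line
--     for line in lines:
--         line = line.strip()
--         if len(line) > 15 and not line.startswith("Thought:"):
--             return line
--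
--     return "Analysis completed"
-- ===== SOURCE B (Python) =====
-- def _extract_analysis_summary(output: str) -> str:
--     fallback = None
--     for line in output.split("\n"):
--         low = line.lower()
--         if "analysis:" in low or "summary:" in low or "overview:" in low:
--             return line.strip()
--         stripped = line.strip()
--         if fallback is None and len(stripped) > 15 and not stripped.startswith("Thought:"):
--             fallback = stripped
--     return fallback if fallback is not None else "Analysis completed"
-- ===== Notes on version B (the rewrite author's own statement) =====
-- stated objective: alternative
-- what changed: A scans the lines twice (keyword pass, then substantial-line pass); B fuses this into a single traversal that maintains a first-substantial-line fallback and returns a keyword line immediately.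
import Mathlib
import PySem

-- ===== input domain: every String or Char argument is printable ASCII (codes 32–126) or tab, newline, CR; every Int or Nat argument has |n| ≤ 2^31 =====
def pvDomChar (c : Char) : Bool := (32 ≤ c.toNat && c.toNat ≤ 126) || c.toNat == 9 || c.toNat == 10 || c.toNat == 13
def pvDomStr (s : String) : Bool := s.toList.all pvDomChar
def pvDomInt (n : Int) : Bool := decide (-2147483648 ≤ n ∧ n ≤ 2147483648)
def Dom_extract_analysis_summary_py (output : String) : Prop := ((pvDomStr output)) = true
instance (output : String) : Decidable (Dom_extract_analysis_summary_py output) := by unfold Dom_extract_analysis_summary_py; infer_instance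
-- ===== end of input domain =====

-- B fuses A's two sequential passes over the lines into one traversal with a fallback accumulator (objective: alternative decomposition).

-- ===== PORT A =====
-- first loop: return the first line containing a keyword (stripped), if any
def pvALoop1 : List String → Option String
  | [] => none
  | l :: ls =>
    if (["analysis:", "summary:", "overview:"].any
        fun w => PySem.Str.isIn w (PySem.Str.lower l)) then
      some (PySem.Str.strip l)
    else pvALoop1 ls

-- second loop: first substantial stripped line
def pvALoop2 : List String → String
  | [] => "Analysis completed"
  | l :: ls =>
    let line := PySem.Str.strip l
    if 15 < PySem.Str.len line ∧ PySem.Str.startswith line "Thought:" = false then line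
    else pvALoop2 ls

def extract_analysis_summary_py (output : String) : String :=
  let lines := (PySem.Str.split? output "\n").getD []
  match pvALoop1 lines with
  | some r => r
  | none => pvALoop2 lines

-- ===== PORT B =====
def pvBLoop : List String → Option String → String
  | [], fb => fb.getD "Analysis completed"
  | l :: ls, fb =>
    let low := PySem.Str.lower l
    if PySem.Str.isIn "analysis:" low || PySem.Str.isIn "summary:" low
        || PySem.Str.isIn "overview:" low then
      PySem.Str.strip l
    else
      let stripped := PySem.Str.strip l
      pvBLoop ls
        (if fb.isNone ∧ 15 < PySem.Str.len stripped
            ∧ PySem.Str.startswith stripped "Thought:" = false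
         then some stripped else fb)

def extract_analysis_summary_py_alt (output : String) : String :=
  pvBLoop ((PySem.Str.split? output "\n").getD []) none

-- ===== PRECONDITION & SPEC =====
def Spec_extract_analysis_summary_py (output : String) (out : String) : Prop := out = extract_analysis_summary_py_alt output
instance (output : String) (out : String) : Decidable (Spec_extract_analysis_summary_py output out) := by unfold Spec_extract_analysis_summary_py; infer_instance

-- ===== CLAIM (what is proved, stated in full; the proofs are below) =====
def Claim_equal_extract_analysis_summary_py : Prop := ∀ (output : String), Dom_extract_analysis_summary_py output → Spec_extract_analysis_summary_py output (extract_analysis_summary_py output)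

-- ===== LEMMAS AND PROOFS =====

-- the two ports test the same keyword condition
theorem pv_kw_eq (l : String) :
    (["analysis:", "summary:", "overview:"].any
        fun w => PySem.Str.isIn w (PySem.Str.lower l))
    = (PySem.Str.isIn "analysis:" (PySem.Str.lower l)
        || PySem.Str.isIn "summary:" (PySem.Str.lower l)
        || PySem.Str.isIn "overview:" (PySem.Str.lower l)) := by
  simp [List.any, Bool.or_assoc]

-- fused-loop invariant: B's single pass with fallback equals A's two passes
theorem pvB_inv (ls : List String) (fb : Option String) :
    pvBLoop ls fb =
      match pvALoop1 ls with
      | some r => r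
      | none => match fb with
        | some f => f
        | none => pvALoop2 ls := by
  induction ls generalizing fb with
  | nil => cases fb <;> simp [pvBLoop, pvALoop1, pvALoop2, Option.getD]
  | cons l ls ih =>
    by_cases hk : (["analysis:", "summary:", "overview:"].any
        fun w => PySem.Str.isIn w (PySem.Str.lower l)) = true
    · rw [pv_kw_eq] at hk
      simp only [pvBLoop, pvALoop1, pv_kw_eq, hk, if_pos]
    · have hk' := hk
      rw [pv_kw_eq] at hk'
      rw [Bool.not_eq_true] at hk'
      simp only [pvBLoop, pvALoop1, pv_kw_eq, hk', Bool.false_eq_true, if_false, ih]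
      cases h1 : pvALoop1 ls with
      | some r => rfl
      | none =>
        cases fb with
        | some f => simp
        | none =>
          by_cases hc : 15 < PySem.Str.len (PySem.Str.strip l)
              ∧ PySem.Str.startswith (PySem.Str.strip l) "Thought:" = false
          · simp only [pvALoop2, Option.isNone, true_and, hc, if_pos]
          · simp only [pvALoop2, Option.isNone, true_and, hc, if_neg, not_false_iff]

-- ===== VERDICT (by name: the statement is the Claim_ definition above) =====
theorem extract_analysis_summary_py_spec : Claim_equal_extract_analysis_summary_py := by
  intro output _
  unfold Spec_extract_analysis_summary_py extract_analysis_summary_py extract_analysis_summary_py_alt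
  rw [pvB_inv]
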